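-- pv_equiv track=rewrite | github.com/daveisagit/advent-of-code | src/2020/day_16.py | apply_inference
-- ===== SOURCE A (Python) =====
-- def apply_inference(rf):
--     """Look for and apply inferences"""
--     change_made = False
--     sz = len(rf)
--     inferences = []
--     for ri, fields in enumerate(rf):
--         possible_fields = [fi for fi, pos in enumerate(fields) if pos]
--         if len(possible_fields) == 1:
--             inferences.append((ri, possible_fields[0]))
--
--     for r, c in inferences:
--         for i in range(sz):
--             if i == r:
--                 continue
--             if rf[i][c] is True:
--                 change_made = True
--             rf[i][c] = False
--
--     return change_made
-- ===== SOURCE B (Python) =====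
-- def apply_inference(rf):
--     """Look for and apply inferences (count-table cell sweep; mutates rf like the original)."""
--     col_count = {}
--     single = []
--     for row in rf:
--         f = row.index(True) if row.count(True) == 1 else None
--         single.append(f)
--         if f is not None:
--             col_count[f] = col_count.get(f, 0) + 1
--     change_made = False
--     for i, row in enumerate(rf):
--         for c in range(len(row)):
--             n = col_count.get(c, 0)
--             if n == 0 or (n == 1 and single[i] == c):
--                 continue
--             if row[c]:
--                 change_made = True
--             row[c] = False
--     return change_made
-- ===== Notes on version B (the rewrite author's own statement) =====
-- stated objective: alternative
-- what changed: A collects (row, field) inference pairs and runs one column-clearing pass per inference; B instead builds a per-column count of singleton rows plus each row's own singleton field, and then does a single cell-by-cell sweep over the whole matrix, deciding each cell from the counts (clear unless the count is 0 or the cell's row is the column's unique source).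
import Mathlib
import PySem

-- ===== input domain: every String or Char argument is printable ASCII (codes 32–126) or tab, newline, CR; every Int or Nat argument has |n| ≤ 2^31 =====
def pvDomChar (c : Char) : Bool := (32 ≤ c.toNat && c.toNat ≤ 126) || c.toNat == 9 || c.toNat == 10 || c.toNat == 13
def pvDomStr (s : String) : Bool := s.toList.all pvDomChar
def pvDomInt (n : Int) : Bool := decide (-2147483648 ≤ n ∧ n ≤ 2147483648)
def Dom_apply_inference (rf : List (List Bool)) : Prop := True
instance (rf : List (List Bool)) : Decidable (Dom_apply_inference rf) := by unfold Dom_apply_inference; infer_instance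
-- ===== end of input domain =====

-- B replaces A's inference-list + per-inference column clears by a per-column count of singleton
-- rows and ONE cell-by-cell sweep deciding each cell from the counts (objective: alternative).
-- Both Pythons mutate rf in place identically; the theorems here are about the RETURN value.

-- ===== PORT A =====
-- possible_fields = [fi for fi, pos in enumerate(fields) if pos]
def pvPF (row : List Bool) : List Int :=
  ((PySem.List.enumerate row).filter (fun p => p.2)).map (fun p => p.1)

-- the `inferences` list A builds in its first loop
def pvInfsA (rf : List (List Bool)) : List (Int × Int) :=
  (PySem.List.enumerate rf).filterMap (fun p =>
    match pvPF p.2 with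
    | [f] => some (p.1, f)
    | _ => none)

-- rf[i][c] read with a default (all accesses are in range under Pre_)
def pvMget (M : List (List Bool)) (i c : Int) : Bool :=
  PySem.List.pyGetD (PySem.List.pyGetD M i []) c false

-- rf[i][c] = False
def pvMset (M : List (List Bool)) (i c : Int) : List (List Bool) :=
  PySem.List.pySetD M i (PySem.List.pySetD (PySem.List.pyGetD M i []) c false)

def apply_inference (rf : List (List Bool)) : Bool :=
  let sz : Int := rf.length
  let infs := pvInfsA rf
  (infs.foldl (fun st rc =>
      (PySem.List.pyRange 0 sz 1).foldl (fun st i =>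
        if i == rc.1 then st
        else (pvMset st.1 i rc.2, st.2 || pvMget st.1 i rc.2)) st)
    (rf, false)).2

-- ===== PORT B =====
-- f = row.index(True) if row.count(True) == 1 else None
def pvSingleOf (row : List Bool) : Option Int :=
  if PySem.List.count row true == 1 then
    -- row.index(True); ValueError (index? = none) is unreachable under count == 1
    match PySem.List.index? row true with
    | some k => some (k : Int)
    | none => none
  else none

def apply_inference_alt (rf : List (List Bool)) : Bool :=
  -- first loop: col_count[f] = col_count.get(f, 0) + 1; single.append(f)
  let st := rf.foldl (fun (st : PySem.Dict Int Int × List (Option Int)) row =>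
      let f := pvSingleOf row
      let single := st.2 ++ [f]
      match f with
      | some c => (st.1.modify c 0 (· + 1), single)
      | none => (st.1, single)) (PySem.Dict.empty, [])
  let col_count := st.1
  let single := st.2
  -- second loop: one sweep over every cell, decided by the counts
  (PySem.List.enumerate rf).foldl (fun change p =>
    (PySem.List.pyRange 0 (p.2.length : Int) 1).foldl (fun change c =>
      let n := col_count.getD c 0
      if n == 0 || (n == 1 && (PySem.List.pyGetD single p.1 none == some c)) then change
      else change || PySem.List.pyGetD p.2 c false) change) false

-- ===== PRECONDITION & SPEC =====
-- Pre_ excludes exactly the inputs where Python A raises IndexError: a row with exactly one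
-- possible field whose field index is out of range for some other row of rf.
def Pre_apply_inference (rf : List (List Bool)) : Prop :=
  ∀ row ∈ rf, row.count true = 1 → ∀ row' ∈ rf, List.idxOf true row < row'.length
instance (rf : List (List Bool)) : Decidable (Pre_apply_inference rf) := by unfold Pre_apply_inference; infer_instance

def pvWitness_apply_inference : List (List Bool) := [[true, false], [false, true]]

def Spec_apply_inference (rf : List (List Bool)) (out : Bool) : Prop := out = apply_inference_alt rf
instance (rf : List (List Bool)) (out : Bool) : Decidable (Spec_apply_inference rf out) := by unfold Spec_apply_inference; infer_instance

-- ===== CLAIM (what is proved, stated in full; the proofs are below) =====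
def Claim_equal_apply_inference : Prop := ∀ (rf : List (List Bool)), Dom_apply_inference rf → Pre_apply_inference rf → Spec_apply_inference rf (apply_inference rf)

-- ===== LEMMAS AND PROOFS =====

-- the rows A's first loop infers for column c, in order
def pvRowsOf (rf : List (List Bool)) (c : Int) : List Int :=
  ((pvInfsA rf).filter (fun q => q.2 == c)).map (fun q => q.1)

-- generic column sweep A's inner loop instantiates
def pvSweep (c : Int) (skip : Int → Bool) (R : List Int) (st : List (List Bool) × Bool) :
    List (List Bool) × Bool :=
  R.foldl (fun st i =>
    if skip i then st
    else (pvMset st.1 i c, st.2 || pvMget st.1 i c)) st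

lemma pvGetD_nonneg {α : Type} (xs : List α) {i : Int} (d : α) (h : 0 ≤ i) :
    PySem.List.pyGetD xs i d = xs.getD i.toNat d := by
  have := PySem.List.pyGetD_natCast xs i.toNat d
  rwa [Int.toNat_of_nonneg h] at this

lemma pvRowSet (r : List Bool) (m m' : Nat) :
    (r.set m false).getD m' false = if m' = m then false else r.getD m' false := by
  rw [List.getD_eq_getElem?_getD, List.getElem?_set]
  by_cases h : m = m'
  · subst h
    by_cases hl : m < r.length
    · simp [hl]
    · simp [hl]
  · have hne : ¬ m' = m := fun hh => h hh.symm
    simp [h, hne, List.getD_eq_getElem?_getD]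

lemma pvMatSet (M : List (List Bool)) (a : List Bool) (n n' : Nat) :
    (M.set n a).getD n' [] = if n' = n ∧ n < M.length then a else M.getD n' [] := by
  rw [List.getD_eq_getElem?_getD, List.getElem?_set]
  by_cases h : n = n'
  · subst h
    by_cases hl : n < M.length
    · simp [hl]
    · simp [hl]
  · have hne : ¬ (n' = n ∧ n < M.length) := fun hh => h hh.1.symm
    simp [h, hne, List.getD_eq_getElem?_getD]

lemma pvGG_set (M : List (List Bool)) (n m n' m' : Nat) :
    ((M.set n ((M.getD n []).set m false)).getD n' []).getD m' false
      = if n' = n ∧ m' = m then false else (M.getD n' []).getD m' false := by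
  rw [pvMatSet]
  by_cases h1 : n' = n ∧ n < M.length
  · rw [if_pos h1, pvRowSet]
    obtain ⟨h1a, _⟩ := h1
    subst h1a
    by_cases h2 : m' = m <;> simp [h2]
  · rw [if_neg h1]
    by_cases h3 : n' = n ∧ m' = m
    · rw [if_pos h3]
      obtain ⟨h3a, _⟩ := h3
      subst h3a
      have hlen : M.length ≤ n' := by
        by_contra hh
        exact h1 ⟨rfl, by omega⟩
      rw [List.getD_eq_getElem?_getD (l := M), List.getElem?_eq_none hlen]
      rfl
    · rw [if_neg h3]

lemma pvMget_mset (M : List (List Bool)) (i c i' c' : Int)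
    (hi : 0 ≤ i) (hc : 0 ≤ c) (hi' : 0 ≤ i') (hc' : 0 ≤ c') :
    pvMget (pvMset M i c) i' c' = if i' = i ∧ c' = c then false else pvMget M i' c' := by
  unfold pvMget pvMset
  rw [PySem.List.pySetD_of_nonneg _ _ hi, PySem.List.pySetD_of_nonneg _ _ hc]
  simp only [pvGetD_nonneg _ _ hi, pvGetD_nonneg _ _ hi', pvGetD_nonneg _ _ hc']
  rw [pvGG_set]
  have hcond : (i'.toNat = i.toNat ∧ c'.toNat = c.toNat) ↔ (i' = i ∧ c' = c) := by omega
  simp [hcond]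

lemma pvSweep_spec (c : Int) (hc : 0 ≤ c) (skip : Int → Bool) :
    ∀ (R : List Int), R.Nodup → (∀ i ∈ R, 0 ≤ i) →
    ∀ (M : List (List Bool)) (b : Bool),
    (pvSweep c skip R (M, b)).2 = (b || R.any (fun i => !skip i && pvMget M i c)) ∧
    ∀ i' c', 0 ≤ i' → 0 ≤ c' →
      pvMget (pvSweep c skip R (M, b)).1 i' c' =
        if c' = c ∧ i' ∈ R ∧ skip i' = false then false else pvMget M i' c' := by
  intro R
  induction R with
  | nil =>
    intro _ _ M b
    refine ⟨by simp [pvSweep], ?_⟩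
    intro i' c' _ _
    simp [pvSweep]
  | cons j R ih =>
    intro hnd hnn M b
    have hj : 0 ≤ j := hnn j (by simp)
    have hnd' : R.Nodup := (List.nodup_cons.mp hnd).2
    have hnn' : ∀ i ∈ R, 0 ≤ i := fun i hi => hnn i (List.mem_cons_of_mem _ hi)
    have hjR : j ∉ R := (List.nodup_cons.mp hnd).1
    by_cases hs : skip j = true
    · have e : pvSweep c skip (j :: R) (M, b) = pvSweep c skip R (M, b) := by
        simp [pvSweep, hs]
      rw [e]
      obtain ⟨e2, e1⟩ := ih hnd' hnn' M b
      refine ⟨?_, ?_⟩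
      · rw [e2]; simp [hs]
      · intro i' c' h1 h2
        rw [e1 i' c' h1 h2]
        by_cases hc1 : c' = c <;> by_cases hm : i' ∈ R <;> by_cases hij : i' = j <;>
          simp [hc1, hm, hij, hs]
    · rw [Bool.not_eq_true] at hs
      have e : pvSweep c skip (j :: R) (M, b)
          = pvSweep c skip R (pvMset M j c, b || pvMget M j c) := by
        simp [pvSweep, hs]
      rw [e]
      obtain ⟨e2, e1⟩ := ih hnd' hnn' (pvMset M j c) (b || pvMget M j c)
      refine ⟨?_, ?_⟩
      · rw [e2]
        have hcg : R.any (fun i => !skip i && pvMget (pvMset M j c) i c)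
            = R.any (fun i => !skip i && pvMget M i c) := by
          apply PySem.List.any_congr_mem
          intro x hx
          rw [pvMget_mset M j c x c hj hc (hnn' x hx) hc]
          have hne : ¬ (x = j ∧ c = c) := fun hh => hjR (hh.1 ▸ hx)
          rw [if_neg hne]
        rw [hcg]
        simp [hs, Bool.or_assoc]
      · intro i' c' h1 h2
        rw [e1 i' c' h1 h2, pvMget_mset M j c i' c' hj hc h1 h2]
        by_cases hc1 : c' = c <;> by_cases hij : i' = j <;> by_cases hm : i' ∈ R <;>
          simp [hc1, hij, hm, hs]

lemma pvOuterA (R : List Int) (hnd : R.Nodup) (hnn : ∀ i ∈ R, 0 ≤ i) :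
    ∀ (P : List (Int × Int)), (∀ p ∈ P, 0 ≤ p.2) →
    ∀ (M : List (List Bool)) (b : Bool),
    (P.foldl (fun st rc => pvSweep rc.2 (fun i => i == rc.1) R st) (M, b)).2 =
      (b || P.any (fun rc => R.any (fun i => !(i == rc.1) && pvMget M i rc.2))) ∧
    ∀ i' c', 0 ≤ i' → 0 ≤ c' →
      pvMget (P.foldl (fun st rc => pvSweep rc.2 (fun i => i == rc.1) R st) (M, b)).1 i' c' =
        if (∃ rc ∈ P, c' = rc.2 ∧ i' ∈ R ∧ i' ≠ rc.1) then false else pvMget M i' c' := by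
  intro P
  induction P with
  | nil =>
    intro _ M b
    refine ⟨by simp, ?_⟩
    intro i' c' _ _
    simp
  | cons rc P ih =>
    intro hP M b
    obtain ⟨r, c⟩ := rc
    have hc : 0 ≤ c := hP (r, c) (by simp)
    have hP' : ∀ p ∈ P, 0 ≤ p.2 := fun p hp => hP p (List.mem_cons_of_mem _ hp)
    rw [List.foldl_cons]
    have key := pvSweep_spec c hc (fun i => i == r) R hnd hnn M b
    rcases hW : pvSweep c (fun i => i == r) R (M, b) with ⟨M1, b1⟩
    rw [hW] at key
    obtain ⟨s2, s1⟩ := key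
    simp only at s2 s1
    obtain ⟨e2, e1⟩ := ih hP' M1 b1
    refine ⟨?_, ?_⟩
    · rw [e2, s2]
      by_cases hX : R.any (fun i => !(i == r) && pvMget M i c) = true
      · simp [List.any_cons, hX]
      · rw [Bool.not_eq_true] at hX
        have hagree : ∀ i ∈ R, ∀ c'', 0 ≤ c'' → pvMget M1 i c'' = pvMget M i c'' := by
          intro i hi c'' hc''
          rw [s1 i c'' (hnn i hi) hc'']
          split_ifs with h
          · obtain ⟨hcc, hiR, hir⟩ := h
            have hir' : (i == r) = false := hir
            have hfa := List.any_eq_false.mp hX i hi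
            rw [hir'] at hfa
            simp only [Bool.not_false, Bool.true_and] at hfa
            subst hcc
            cases h' : pvMget M i c'' with
            | false => rfl
            | true => exact absurd h' hfa
          · rfl
        have hcg : P.any (fun rc' => R.any (fun i => !(i == rc'.1) && pvMget M1 i rc'.2))
            = P.any (fun rc' => R.any (fun i => !(i == rc'.1) && pvMget M i rc'.2)) := by
          apply PySem.List.any_congr_mem
          intro rc' hrc'
          apply PySem.List.any_congr_mem
          intro i hi
          rw [hagree i hi rc'.2 (hP' rc' hrc')]
        rw [hcg]
        simp [List.any_cons, hX]
    · intro i' c' h1 h2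
      rw [e1 i' c' h1 h2]
      by_cases hA : ∃ rc ∈ P, c' = rc.2 ∧ i' ∈ R ∧ i' ≠ rc.1
      · rw [if_pos hA, if_pos ?_]
        obtain ⟨rc', hrc', hh⟩ := hA
        exact ⟨rc', List.mem_cons_of_mem _ hrc', hh⟩
      · rw [if_neg hA, s1 i' c' h1 h2]
        by_cases hB : c' = c ∧ i' ∈ R ∧ (i' == r) = false
        · rw [if_pos hB, if_pos ?_]
          exact ⟨(r, c), by simp, hB.1, hB.2.1, by simpa using hB.2.2⟩
        · rw [if_neg hB, if_neg ?_]
          rintro ⟨rc', hrc', hh⟩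
          rcases List.mem_cons.mp hrc' with h | h
          · subst h
            exact hB ⟨hh.1, hh.2.1, by simpa using hh.2.2⟩
          · exact hA ⟨rc', h, hh⟩

-- A's first loop produces only nonnegative field indices
lemma pvPF_nonneg (row : List Bool) : ∀ f ∈ pvPF row, 0 ≤ f := by
  intro f hf
  simp only [pvPF, List.mem_map, List.mem_filter] at hf
  obtain ⟨q, ⟨hq, _⟩, rfl⟩ := hf
  have hmem : q.1 ∈ (PySem.List.enumerate row 0).map (fun x => x.1) :=
    List.mem_map_of_mem hq
  rw [PySem.List.map_fst_enumerate] at hmem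
  exact (PySem.List.mem_pyRange_one.mp hmem).1

lemma pvInfsA_snd_nonneg (rf : List (List Bool)) : ∀ p ∈ pvInfsA rf, 0 ≤ p.2 := by
  intro p hp
  unfold pvInfsA at hp
  rw [List.mem_filterMap] at hp
  obtain ⟨a, _, hg⟩ := hp
  rcases hpf : pvPF a.2 with _ | ⟨f, _ | ⟨x, t⟩⟩ <;> rw [hpf] at hg
  · simp at hg
  · obtain rfl := (Option.some_inj.mp hg).symm
    exact pvPF_nonneg a.2 f (by rw [hpf]; simp)
  · simp at hg

-- first components of A's inference list are distinct (they come from enumerate)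
lemma pvSubFst {α β γ : Type} (l : List (α × β)) (g : α × β → Option (α × γ))
    (hg : ∀ p q, g p = some q → q.1 = p.1) :
    ((l.filterMap g).map (fun q => q.1)).Sublist (l.map (fun p => p.1)) := by
  induction l with
  | nil => simp
  | cons p l ih =>
    rw [List.filterMap_cons, List.map_cons]
    cases hq : g p with
    | none => exact ih.cons p.1
    | some q =>
      rw [List.map_cons, hg p q hq]
      exact ih.cons₂ p.1

lemma pvFstNodup (rf : List (List Bool)) : ((pvInfsA rf).map (fun p => p.1)).Nodup := by
  have hsub := pvSubFst (PySem.List.enumerate rf)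
    (fun p => match pvPF p.2 with
      | [f] => some (p.1, f)
      | _ => none)
    (by
      intro p q hq
      have hq' : (match pvPF p.2 with
        | [f] => some (p.1, f)
        | _ => none) = some q := hq
      rcases hpf : pvPF p.2 with _ | ⟨f, _ | ⟨x, t⟩⟩ <;> rw [hpf] at hq'
      · simp at hq'
      · obtain rfl := (Option.some_inj.mp hq').symm; rfl
      · simp at hq')
  have hen : ((PySem.List.enumerate rf).map (fun p => p.1)).Nodup := by
    rw [PySem.List.map_fst_enumerate]
    exact PySem.List.nodup_pyRange_one _ _
  exact hsub.nodup hen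

lemma pvRowsNodup (rf : List (List Bool)) (c : Int) : (pvRowsOf rf c).Nodup := by
  have h1 : (pvRowsOf rf c).Sublist ((pvInfsA rf).map (fun p => p.1)) :=
    List.Sublist.map _ List.filter_sublist
  exact h1.nodup (pvFstNodup rf)

lemma pvMemRows (rf : List (List Bool)) (r c : Int) :
    r ∈ pvRowsOf rf c ↔ (r, c) ∈ pvInfsA rf := by
  simp only [pvRowsOf, List.mem_map, List.mem_filter, beq_iff_eq]
  constructor
  · rintro ⟨⟨q1, q2⟩, ⟨hq, rfl⟩, rfl⟩
    exact hq
  · intro h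
    exact ⟨(r, c), ⟨h, rfl⟩, rfl⟩

lemma pvSingleton {i : Int} : ∀ {l : List Int}, l.Nodup → l ≠ [] → (∀ x ∈ l, x = i) → l = [i] := by
  intro l hnd hne hall
  cases l with
  | nil => exact absurd rfl hne
  | cons x t =>
    have hx : x = i := hall x (by simp)
    cases t with
    | nil => rw [hx]
    | cons y u =>
      exfalso
      have hy : y = i := hall y (by simp)
      exact (List.nodup_cons.mp hnd).1 (by simp [hx, hy])

lemma pvA_char (rf : List (List Bool)) :
    apply_inference rf
      = ((pvInfsA rf).any (fun rc => (PySem.List.pyRange 0 (rf.length : Int) 1).any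
          (fun i => !(i == rc.1) && pvMget rf i rc.2))) := by
  have h := (pvOuterA (PySem.List.pyRange 0 (rf.length : Int) 1)
      (PySem.List.nodup_pyRange_one _ _)
      (fun i hi => (PySem.List.mem_pyRange_one.mp hi).1)
      (pvInfsA rf) (pvInfsA_snd_nonneg rf) rf false).1
  simp only [pvSweep] at h
  simpa [apply_inference] using h

-- ===== B-side lemmas =====

-- a ||-accumulating fold is an any
lemma pvFoldlOr {α : Type} (f : α → Bool) :
    ∀ (l : List α) (b : Bool), l.foldl (fun b x => b || f x) b = (b || l.any f) := by
  intro l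
  induction l with
  | nil => intro b; simp
  | cons x t ih =>
    intro b
    rw [List.foldl_cons, ih]
    simp [Bool.or_assoc]

-- the possible-fields list of a row is empty iff the row has no True
lemma pvFilterEmpty (t : List Bool) (s : Int) :
    (((PySem.List.enumerate t s).filter (fun p => p.2)).map (fun p => p.1) = [])
      ↔ t.count true = 0 := by
  rw [List.map_eq_nil_iff, List.filter_eq_nil_iff, List.count_eq_zero]
  constructor
  · intro h hmem
    obtain ⟨k, hk, hp⟩ := List.mem_iff_getElem.mp hmem
    exact absurd (by simpa using hp)
      (h (s + k, t[k]) ((PySem.List.mem_enumerate_iff t s _).mpr ⟨k, hk, rfl⟩))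
  · intro h p hp hp2
    rw [PySem.List.mem_enumerate_iff] at hp
    obtain ⟨k, hk, rfl⟩ := hp
    exact h (List.mem_iff_getElem.mpr ⟨k, hk, by simpa using hp2⟩)

-- characterization of a singleton possible-fields list (offset-generalized)
lemma pvPF_single_iff :
    ∀ (row : List Bool) (s c : Int),
    ((PySem.List.enumerate row s).filter (fun p => p.2)).map (fun p => p.1) = [c]
      ↔ (row.count true = 1 ∧ ∃ k : Nat, PySem.List.index? row true = some k ∧ c = s + k) := by
  intro row
  induction row with
  | nil =>
    intro s c
    simp [PySem.List.enumerate_nil]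
  | cons b t ih =>
    intro s c
    rw [PySem.List.enumerate_cons]
    cases b with
    | false =>
      rw [List.filter_cons_of_neg (by simp),
        PySem.List.index?_cons_of_ne t (show (false : Bool) ≠ true by decide),
        List.count_cons_of_ne (by decide), ih (s + 1) c]
      constructor
      · rintro ⟨h1, k, hk, hc⟩
        exact ⟨h1, k + 1, by rw [hk]; rfl, by omega⟩
      · rintro ⟨h1, k, hk, hc⟩
        cases hidx : PySem.List.index? t true with
        | none => rw [hidx] at hk; simp at hk
        | some k' =>
          rw [hidx] at hk
          simp only [Option.map_some, Option.some_inj] at hk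
          exact ⟨h1, k', rfl, by omega⟩
    | true =>
      rw [List.filter_cons_of_pos (by simp), List.map_cons,
        PySem.List.index?_cons_self, List.count_cons_self]
      constructor
      · intro h
        simp only [List.cons.injEq] at h
        have hct : t.count true = 0 := (pvFilterEmpty t (s + 1)).mp h.2
        exact ⟨by omega, 0, rfl, by omega⟩
      · rintro ⟨h1, k, hk, hc⟩
        have hk0 : k = 0 := by simpa using hk.symm
        subst hk0
        have hct : t.count true = 0 := by omega
        simp only [List.cons.injEq]
        exact ⟨by omega, (pvFilterEmpty t (s + 1)).mpr hct⟩

-- the port's `f` expression is exactly "pvPF row is a singleton"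
lemma pvSingleOf_iff (row : List Bool) (c : Int) :
    pvSingleOf row = some c ↔ pvPF row = [c] := by
  unfold pvSingleOf pvPF
  rw [pvPF_single_iff row 0 c]
  by_cases hcnt : row.count true = 1
  · rw [if_pos (by simp [PySem.List.count_eq, hcnt])]
    cases hidx : PySem.List.index? row true with
    | none =>
      constructor
      · intro h
        exact absurd h (by simp)
      · rintro ⟨_, k, hk, _⟩
        exact absurd hk (by simp)
    | some k =>
      constructor
      · intro h
        simp only [Option.some_inj] at h
        exact ⟨hcnt, k, rfl, by omega⟩
      · rintro ⟨_, k', hk', hc⟩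
        simp only [Option.some_inj] at hk'
        subst hk'
        simp only [Option.some_inj]
        omega
  · rw [if_neg (by simp [PySem.List.count_eq, hcnt])]
    constructor
    · intro h
      exact absurd h (by simp)
    · rintro ⟨h1, _⟩
      exact absurd h1 hcnt

-- A's inference list, phrased through pvSingleOf
lemma pvInfsA_eq_single (rf : List (List Bool)) :
    pvInfsA rf = (PySem.List.enumerate rf).filterMap
      (fun p => (pvSingleOf p.2).map (fun c => (p.1, c))) := by
  unfold pvInfsA
  congr 1
  funext p
  cases hso : pvSingleOf p.2 with
  | some c =>
    rw [(pvSingleOf_iff p.2 c).mp hso]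
    simp
  | none =>
    rcases hpf : pvPF p.2 with _ | ⟨f, _ | ⟨x, t⟩⟩
    · simp
    · exact absurd hso (by rw [(pvSingleOf_iff p.2 f).mpr hpf]; simp)
    · simp

-- counting in a filterMap
lemma pvCountFilterMap {α β : Type} [DecidableEq β] (f : α → Option β) (c : β) :
    ∀ (l : List α), (l.filterMap f).count c = l.countP (fun x => f x == some c) := by
  intro l
  induction l with
  | nil => simp
  | cons x t ih =>
    rw [List.filterMap_cons, List.countP_cons]
    cases hx : f x with
    | none => simpa using ih
    | some v =>
      rw [List.count_cons, ih]
      by_cases hv : v = c <;> simp [hv]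

-- countP in a filterMap
lemma pvCountPFilterMap {α β : Type} (f : α → Option β) (q : β → Bool) :
    ∀ (l : List α),
    (l.filterMap f).countP q = l.countP (fun x => ((f x).map q).getD false) := by
  intro l
  induction l with
  | nil => simp
  | cons x t ih =>
    rw [List.filterMap_cons, List.countP_cons]
    cases hx : f x with
    | none => simp [ih]
    | some v =>
      rw [List.countP_cons, ih]
      simp

-- the per-column count B builds equals the number of inferred rows for that column
lemma pvCount_eq_rows (rf : List (List Bool)) (c : Int) :
    (rf.filterMap pvSingleOf).count c = (pvRowsOf rf c).length := by
  rw [pvCountFilterMap, pvRowsOf, List.length_map, ← List.countP_eq_length_filter,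
    pvInfsA_eq_single, pvCountPFilterMap]
  conv_lhs => rw [← PySem.List.map_snd_enumerate rf 0]
  rw [List.countP_map]
  apply List.countP_congr
  intro p _
  cases hso : pvSingleOf p.2 <;> simp [Function.comp, hso]

-- B's first fold, split into its two components
lemma pvFirst_split (rf : List (List Bool)) :
    ∀ (d : PySem.Dict Int Int) (acc : List (Option Int)),
    (rf.foldl (fun (st : PySem.Dict Int Int × List (Option Int)) row =>
        let f := pvSingleOf row
        let single := st.2 ++ [f]
        match f with
        | some c => (st.1.modify c 0 (· + 1), single)
        | none => (st.1, single)) (d, acc))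
      = ((rf.filterMap pvSingleOf).foldl (fun d x => d.modify x 0 (· + 1)) d,
         acc ++ rf.map pvSingleOf) := by
  induction rf with
  | nil => intro d acc; simp
  | cons row t ih =>
    intro d acc
    rw [List.foldl_cons, List.filterMap_cons, List.map_cons]
    cases hso : pvSingleOf row with
    | some c =>
      rw [ih]
      simp
    | none =>
      rw [ih]
      simp

-- an if-guarded ||-accumulating fold is an any
lemma pvFoldlIfOr {α : Type} (g f : α → Bool) :
    ∀ (l : List α) (b : Bool),
    l.foldl (fun b x => if g x then b else b || f x) b = (b || l.any (fun x => !g x && f x)) := by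
  intro l
  induction l with
  | nil => intro b; simp
  | cons x t ih =>
    intro b
    rw [List.foldl_cons]
    cases hg : g x <;> simp [hg, ih, Bool.or_assoc]

-- characterization of B's port as a double any over the original matrix
lemma pvB_char (rf : List (List Bool)) :
    apply_inference_alt rf
      = (PySem.List.enumerate rf).any (fun p =>
          (PySem.List.pyRange 0 (p.2.length : Int) 1).any (fun c =>
            !(((((rf.filterMap pvSingleOf).count c : Int)) == 0)
              || ((((rf.filterMap pvSingleOf).count c : Int)) == 1
                  && (pvSingleOf p.2 == some c)))
            && PySem.List.pyGetD p.2 c false)) := by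
  have hst := pvFirst_split rf PySem.Dict.empty []
  unfold apply_inference_alt
  rw [hst]
  simp only [List.nil_append, pvFoldlIfOr, pvFoldlOr, Bool.false_or,
    PySem.Dict.getD_foldl_modify_add_one, PySem.Dict.getD_empty, zero_add]
  apply PySem.List.any_congr_mem
  intro p hp
  rw [PySem.List.mem_enumerate_iff] at hp
  obtain ⟨k, hk, rfl⟩ := hp
  apply PySem.List.any_congr_mem
  intro c _
  have hsingle : PySem.List.pyGetD (rf.map pvSingleOf) ((0 : Int) + k) none
      = pvSingleOf rf[k] := by
    rw [show ((0 : Int) + k) = ((k : Nat) : Int) by omega, PySem.List.pyGetD_natCast,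
      List.getD_eq_getElem?_getD, List.getElem?_map, List.getElem?_eq_getElem hk]
    rfl
  rw [hsingle]

-- membership in A's inference list, phrased through pvSingleOf
lemma pvInfs_mem_iff (rf : List (List Bool)) (k : Nat) (hk : k < rf.length) (c : Int) :
    ((0 : Int) + k, c) ∈ pvInfsA rf ↔ pvSingleOf rf[k] = some c := by
  rw [pvInfsA_eq_single, List.mem_filterMap]
  constructor
  · rintro ⟨q, hq, hmap⟩
    rw [PySem.List.mem_enumerate_iff] at hq
    obtain ⟨k', hk', rfl⟩ := hq
    cases hso : pvSingleOf rf[k'] with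
    | none => rw [hso] at hmap; simp at hmap
    | some c' =>
      rw [hso] at hmap
      simp only [Option.map_some, Option.some_inj, Prod.mk.injEq] at hmap
      obtain ⟨hkk, hcc⟩ := hmap
      have hke : k' = k := by omega
      subst hke
      rw [hso, hcc]
  · intro hso
    exact ⟨((0 : Int) + k, rf[k]), (PySem.List.mem_enumerate_iff rf 0 _).mpr ⟨k, hk, rfl⟩,
      by rw [hso]; rfl⟩

-- reading a cell of the original matrix at a row index coming from enumerate
lemma pvMget_cell (rf : List (List Bool)) (k : Nat) (hk : k < rf.length) (c : Int) :
    pvMget rf ((0 : Int) + k) c = PySem.List.pyGetD rf[k] c false := by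
  unfold pvMget
  congr 1
  rw [show ((0 : Int) + k) = ((k : Nat) : Int) by omega, PySem.List.pyGetD_natCast,
    List.getD_eq_getElem?_getD, List.getElem?_eq_getElem hk]
  rfl

-- a true cell read (at a nonnegative column) is in range
lemma pvGet_true_lt (xs : List Bool) (c : Int) (hc : 0 ≤ c)
    (h : PySem.List.pyGetD xs c false = true) : c < (xs.length : Int) := by
  rw [pvGetD_nonneg xs false hc] at h
  by_contra hh
  rw [List.getD_eq_getElem?_getD, List.getElem?_eq_none (by omega)] at h
  simp at h

-- the crux: A's flag formula and B's flag formula agree on the original matrix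
lemma pvMain (rf : List (List Bool)) :
    ((pvInfsA rf).any (fun rc => (PySem.List.pyRange 0 (rf.length : Int) 1).any
        (fun i => !(i == rc.1) && pvMget rf i rc.2)))
    = (PySem.List.enumerate rf).any (fun p =>
        (PySem.List.pyRange 0 (p.2.length : Int) 1).any (fun c =>
          !(((((rf.filterMap pvSingleOf).count c : Int)) == 0)
            || ((((rf.filterMap pvSingleOf).count c : Int)) == 1
                && (pvSingleOf p.2 == some c)))
          && PySem.List.pyGetD p.2 c false)) := by
  rw [Bool.eq_iff_iff]
  constructor
  · intro hA
    rw [List.any_eq_true] at hA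
    obtain ⟨⟨r, c⟩, hrc, hin⟩ := hA
    rw [List.any_eq_true] at hin
    obtain ⟨i, hiR, hcond⟩ := hin
    rw [Bool.and_eq_true] at hcond
    obtain ⟨hir, hg⟩ := hcond
    simp only [Bool.not_eq_eq_eq_not, Bool.not_true, beq_eq_false_iff_ne, ne_eq] at hir
    obtain ⟨hi0, hisz⟩ := PySem.List.mem_pyRange_one.mp hiR
    have hk : i.toNat < rf.length := by omega
    have hieq : i = (0 : Int) + i.toNat := by omega
    have hc0 : 0 ≤ c := pvInfsA_snd_nonneg rf (r, c) hrc
    rw [hieq, pvMget_cell rf i.toNat hk] at hg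
    have hclen : c < (rf[i.toNat].length : Int) := pvGet_true_lt _ c hc0 hg
    rw [List.any_eq_true]
    refine ⟨((0 : Int) + i.toNat, rf[i.toNat]),
      (PySem.List.mem_enumerate_iff rf 0 _).mpr ⟨i.toNat, hk, rfl⟩, ?_⟩
    rw [List.any_eq_true]
    refine ⟨c, PySem.List.mem_pyRange_one.mpr ⟨hc0, hclen⟩, ?_⟩
    have hr : r ∈ pvRowsOf rf c := (pvMemRows rf r c).mpr hrc
    have hXY : (((((rf.filterMap pvSingleOf).count c : Int)) == 0)
        || ((((rf.filterMap pvSingleOf).count c : Int)) == 1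
            && (pvSingleOf rf[i.toNat] == some c))) = false := by
      rw [Bool.or_eq_false_iff]
      constructor
      · simp only [beq_eq_false_iff_ne, ne_eq, Nat.cast_eq_zero]
        intro h0
        rw [pvCount_eq_rows, List.length_eq_zero_iff] at h0
        rw [h0] at hr
        exact absurd hr (List.not_mem_nil)
      · by_cases hS : pvSingleOf rf[i.toNat] = some c
        · have hmemk : ((0 : Int) + i.toNat) ∈ pvRowsOf rf c :=
            (pvMemRows rf _ c).mpr ((pvInfs_mem_iff rf i.toNat hk c).mpr hS)
          rw [Bool.and_eq_false_iff]
          left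
          simp only [beq_eq_false_iff_ne, ne_eq]
          intro h1
          have h1' : (pvRowsOf rf c).length = 1 := by
            rw [pvCount_eq_rows] at h1
            exact_mod_cast h1
          obtain ⟨a, ha⟩ := List.length_eq_one_iff.mp h1'
          rw [ha] at hr hmemk
          simp only [List.mem_singleton] at hr hmemk
          exact hir (by omega)
        · rw [Bool.and_eq_false_iff]
          right
          exact beq_eq_false_iff_ne.mpr hS
    rw [hXY]
    simpa using hg
  · intro hB
    rw [List.any_eq_true] at hB
    obtain ⟨p, hp, hin⟩ := hB
    rw [PySem.List.mem_enumerate_iff] at hp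
    obtain ⟨k, hk, rfl⟩ := hp
    rw [List.any_eq_true] at hin
    obtain ⟨c, hcR, hcond⟩ := hin
    rw [Bool.and_eq_true] at hcond
    obtain ⟨hguard, hget⟩ := hcond
    simp only [Bool.not_eq_eq_eq_not, Bool.not_true, Bool.or_eq_false_iff] at hguard
    obtain ⟨hX, hY⟩ := hguard
    obtain ⟨hc0, _⟩ := PySem.List.mem_pyRange_one.mp hcR
    have hne : pvRowsOf rf c ≠ [] := by
      intro hnil
      have : (rf.filterMap pvSingleOf).count c = 0 := by
        rw [pvCount_eq_rows, hnil]
        rfl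
      rw [this] at hX
      simp at hX
    have hex : ∃ r ∈ pvRowsOf rf c, r ≠ (0 : Int) + k := by
      by_contra hcon
      push Not at hcon
      have hsing := pvSingleton (pvRowsNodup rf c) hne hcon
      have hmemk : ((0 : Int) + k) ∈ pvRowsOf rf c := by rw [hsing]; simp
      have hS : pvSingleOf rf[k] = some c :=
        (pvInfs_mem_iff rf k hk c).mp ((pvMemRows rf _ c).mp hmemk)
      have hN1 : (rf.filterMap pvSingleOf).count c = 1 := by
        rw [pvCount_eq_rows, hsing]
        rfl
      rw [hN1, hS] at hY
      simp at hY
    obtain ⟨r, hr, hrk⟩ := hex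
    rw [List.any_eq_true]
    refine ⟨(r, c), (pvMemRows rf r c).mp hr, ?_⟩
    rw [List.any_eq_true]
    refine ⟨(0 : Int) + k, PySem.List.mem_pyRange_one.mpr ⟨by omega, by
      have : (k : Int) < (rf.length : Int) := by exact_mod_cast hk
      omega⟩, ?_⟩
    rw [Bool.and_eq_true]
    refine ⟨?_, by rw [pvMget_cell rf k hk]; exact hget⟩
    simp only [Bool.not_eq_eq_eq_not, Bool.not_true, beq_eq_false_iff_ne, ne_eq]
    intro hh
    exact hrk hh.symm

theorem apply_inference_spec : Claim_equal_apply_inference := by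
  intro rf _ _
  unfold Spec_apply_inference
  rw [pvA_char, pvMain, pvB_char]
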